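-- pv_equiv track=rewrite | github.com/udsy19/Subdomain-Enumerator | main_tui_merged.py | _industry_specific_generation
-- ===== SOURCE A (Python) =====
-- from typing import Set, List, Dict, Tuple, Optional
--
-- def _industry_specific_generation(domain: str) -> Set[str]:
--     """Generate industry-specific subdomains based on domain analysis"""
--     candidates = set()
--
--     # Analyze domain for industry indicators
--     domain_lower = domain.lower()
--
--     # Technology/Software
--     if any(tech in domain_lower for tech in ['tech', 'soft', 'app', 'code', 'dev']):
--         tech_subs = ['git', 'jenkins', 'ci', 'cd', 'docker', 'k8s', 'monitoring', 'metrics',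
--                     'logs', 'grafana', 'prometheus', 'artifactory', 'nexus', 'sonar']
--         candidates.update(f"{sub}.{domain}" for sub in tech_subs)
--
--     # Finance/Banking
--     if any(fin in domain_lower for fin in ['bank', 'fin', 'pay', 'money', 'credit', 'invest']):
--         fin_subs = ['payment', 'secure', 'vault', 'transaction', 'account', 'balance',
--                    'transfer', 'compliance', 'kyc', 'aml', 'fraud']
--         candidates.update(f"{sub}.{domain}" for sub in fin_subs)
--
--     # E-commerce/Retail
--     if any(ecom in domain_lower for ecom in ['shop', 'store', 'retail', 'ecom', 'cart']):
--         ecom_subs = ['cart', 'checkout', 'payment', 'inventory', 'catalog', 'search',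
--                     'recommendation', 'review', 'order', 'shipping', 'tracking']
--         candidates.update(f"{sub}.{domain}" for sub in ecom_subs)
--
--     # Healthcare
--     if any(health in domain_lower for health in ['health', 'med', 'care', 'hospital', 'clinic']):
--         health_subs = ['patient', 'appointment', 'record', 'pharmacy', 'lab', 'radiology',
--                       'billing', 'insurance', 'hipaa', 'emr', 'ehr']
--         candidates.update(f"{sub}.{domain}" for sub in health_subs)
--
--     # Education
--     if any(edu in domain_lower for edu in ['edu', 'school', 'university', 'college', 'learn']):
--         edu_subs = ['student', 'faculty', 'library', 'course', 'grade', 'schedule',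
--                    'enrollment', 'campus', 'research', 'lab', 'portal']
--         candidates.update(f"{sub}.{domain}" for sub in edu_subs)
--
--     return candidates
-- ===== SOURCE B (Python) =====
-- # Inverted matching: instead of scanning the domain once per keyword (26 'in'
-- # scans), enumerate each substring of length 3..10 of the lowercased domain
-- # once and look it up in a keyword->industry hash index; then emit the
-- # candidate lists of the industries that were hit.
--
-- _KEYWORD_TO_INDUSTRY = {
--     'tech': 0, 'soft': 0, 'app': 0, 'code': 0, 'dev': 0,
--     'bank': 1, 'fin': 1, 'pay': 1, 'money': 1, 'credit': 1, 'invest': 1,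
--     'shop': 2, 'store': 2, 'retail': 2, 'ecom': 2, 'cart': 2,
--     'health': 3, 'med': 3, 'care': 3, 'hospital': 3, 'clinic': 3,
--     'edu': 4, 'school': 4, 'university': 4, 'college': 4, 'learn': 4,
-- }
--
-- _SUBS = [
--     ['git', 'jenkins', 'ci', 'cd', 'docker', 'k8s', 'monitoring', 'metrics',
--      'logs', 'grafana', 'prometheus', 'artifactory', 'nexus', 'sonar'],
--     ['payment', 'secure', 'vault', 'transaction', 'account', 'balance',
--      'transfer', 'compliance', 'kyc', 'aml', 'fraud'],
--     ['cart', 'checkout', 'payment', 'inventory', 'catalog', 'search',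
--      'recommendation', 'review', 'order', 'shipping', 'tracking'],
--     ['patient', 'appointment', 'record', 'pharmacy', 'lab', 'radiology',
--      'billing', 'insurance', 'hipaa', 'emr', 'ehr'],
--     ['student', 'faculty', 'library', 'course', 'grade', 'schedule',
--      'enrollment', 'campus', 'research', 'lab', 'portal'],
-- ]
--
-- def _industry_specific_generation(domain: str):
--     domain_lower = domain.lower()
--     n = len(domain_lower)
--     hits = set()
--     for i in range(n):
--         for length in range(3, 11):
--             k = _KEYWORD_TO_INDUSTRY.get(domain_lower[i:i + length])
--             if k is not None:
--                 hits.add(k)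
--     candidates = set()
--     for idx, subs in enumerate(_SUBS):
--         if idx in hits:
--             candidates.update(f"{sub}.{domain}" for sub in subs)
--     return candidates
-- ===== Notes on version B (the rewrite author's own statement) =====
-- stated objective: alternative
-- what changed: Inverted the matching direction: instead of scanning the domain once per keyword (26 substring 'in' scans feeding five hardcoded if-blocks), B enumerates each substring of length 3..10 of the lowercased domain once and looks it up in a keyword-to-industry hash index, collects the set of industries hit, then emits the candidate lists of the hit industries.
import Mathlib
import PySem

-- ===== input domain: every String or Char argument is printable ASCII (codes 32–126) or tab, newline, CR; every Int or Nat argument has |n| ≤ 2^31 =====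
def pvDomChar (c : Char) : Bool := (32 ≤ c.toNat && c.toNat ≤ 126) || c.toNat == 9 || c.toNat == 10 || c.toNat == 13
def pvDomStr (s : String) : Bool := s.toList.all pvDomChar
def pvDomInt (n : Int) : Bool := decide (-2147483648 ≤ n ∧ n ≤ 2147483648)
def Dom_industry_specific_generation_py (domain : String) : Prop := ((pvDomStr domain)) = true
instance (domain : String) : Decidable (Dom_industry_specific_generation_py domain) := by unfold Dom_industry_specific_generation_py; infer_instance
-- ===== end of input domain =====

-- B inverts the matching: instead of one 'in' scan of the domain per keyword, it enumerates each
-- substring of length 3..10 of the lowercased domain once and looks it up in a keyword->industry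
-- hash index, then emits the candidate lists of the industries hit (objective: alternative).

-- ===== PORT A =====
def industry_specific_generation_py (domain : String) : List String :=
  let candidates : PySem.Set String := PySem.Set.empty
  let domain_lower := PySem.Str.lower domain
  let candidates :=
    if (["tech", "soft", "app", "code", "dev"]).any (fun tech => PySem.Str.isIn tech domain_lower) then
      PySem.Set.update candidates ((["git", "jenkins", "ci", "cd", "docker", "k8s", "monitoring", "metrics", "logs", "grafana", "prometheus", "artifactory", "nexus", "sonar"]).map (fun sub => sub ++ "." ++ domain))
    else candidates
  let candidates :=
    if (["bank", "fin", "pay", "money", "credit", "invest"]).any (fun fin => PySem.Str.isIn fin domain_lower) then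
      PySem.Set.update candidates ((["payment", "secure", "vault", "transaction", "account", "balance", "transfer", "compliance", "kyc", "aml", "fraud"]).map (fun sub => sub ++ "." ++ domain))
    else candidates
  let candidates :=
    if (["shop", "store", "retail", "ecom", "cart"]).any (fun ecom => PySem.Str.isIn ecom domain_lower) then
      PySem.Set.update candidates ((["cart", "checkout", "payment", "inventory", "catalog", "search", "recommendation", "review", "order", "shipping", "tracking"]).map (fun sub => sub ++ "." ++ domain))
    else candidates
  let candidates :=
    if (["health", "med", "care", "hospital", "clinic"]).any (fun health => PySem.Str.isIn health domain_lower) then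
      PySem.Set.update candidates ((["patient", "appointment", "record", "pharmacy", "lab", "radiology", "billing", "insurance", "hipaa", "emr", "ehr"]).map (fun sub => sub ++ "." ++ domain))
    else candidates
  let candidates :=
    if (["edu", "school", "university", "college", "learn"]).any (fun edu => PySem.Str.isIn edu domain_lower) then
      PySem.Set.update candidates ((["student", "faculty", "library", "course", "grade", "schedule", "enrollment", "campus", "research", "lab", "portal"]).map (fun sub => sub ++ "." ++ domain))
    else candidates
  candidates

-- ===== PORT B =====
-- Source B's _KEYWORD_TO_INDUSTRY dict (insertion order) and _SUBS table
def pvKWS : List (String × Int) :=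
  [("tech", 0), ("soft", 0), ("app", 0), ("code", 0), ("dev", 0),
   ("bank", 1), ("fin", 1), ("pay", 1), ("money", 1), ("credit", 1), ("invest", 1),
   ("shop", 2), ("store", 2), ("retail", 2), ("ecom", 2), ("cart", 2),
   ("health", 3), ("med", 3), ("care", 3), ("hospital", 3), ("clinic", 3),
   ("edu", 4), ("school", 4), ("university", 4), ("college", 4), ("learn", 4)]

def pvKW : PySem.Dict String Int := PySem.Dict.ofList pvKWS

def pvSUBS : List (List String) :=
  [["git", "jenkins", "ci", "cd", "docker", "k8s", "monitoring", "metrics", "logs", "grafana", "prometheus", "artifactory", "nexus", "sonar"],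
   ["payment", "secure", "vault", "transaction", "account", "balance", "transfer", "compliance", "kyc", "aml", "fraud"],
   ["cart", "checkout", "payment", "inventory", "catalog", "search", "recommendation", "review", "order", "shipping", "tracking"],
   ["patient", "appointment", "record", "pharmacy", "lab", "radiology", "billing", "insurance", "hipaa", "emr", "ehr"],
   ["student", "faculty", "library", "course", "grade", "schedule", "enrollment", "campus", "research", "lab", "portal"]]

def industry_specific_generation_py_alt (domain : String) : List String :=
  let domain_lower := PySem.Str.lower domain
  let n : Int := PySem.Str.len domain_lower
  let hits : PySem.Set Int :=
    (PySem.List.pyRange 0 n).foldl (fun hits i =>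
      (PySem.List.pyRange 3 11).foldl (fun hits len =>
        match PySem.Dict.get? pvKW (PySem.Str.slice domain_lower (some i) (some (i + len))) with
        | some k => PySem.Set.add hits k
        | none => hits) hits) PySem.Set.empty
  (PySem.List.enumerate pvSUBS).foldl
    (fun candidates p =>
      if PySem.Set.contains hits p.1 then
        PySem.Set.update candidates (p.2.map (fun sub => sub ++ "." ++ domain))
      else candidates)
    PySem.Set.empty

-- ===== PRECONDITION & SPEC =====
def Spec_industry_specific_generation_py (domain : String) (out : List String) : Prop := out = industry_specific_generation_py_alt domain
instance (domain : String) (out : List String) : Decidable (Spec_industry_specific_generation_py domain out) := by unfold Spec_industry_specific_generation_py; infer_instance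

-- ===== CLAIM =====
def Claim_equal_industry_specific_generation_py : Prop := ∀ (domain : String), Dom_industry_specific_generation_py domain → Spec_industry_specific_generation_py domain (industry_specific_generation_py domain)

-- ===== LEMMAS AND PROOFS =====
-- first-match lookup in a literal dict with distinct keys is list membership of the pair
theorem pv_get?_mk_iff (l : List (String × Int)) (hnd : (l.map Prod.fst).Nodup) (s : String) (k : Int) :
    (PySem.Dict.mk l).get? s = some k ↔ (s, k) ∈ l := by
  induction l with
  | nil => simp [PySem.Dict.get?]
  | cons a t ih =>
    rw [PySem.Dict.get?_mk_cons]
    simp only [List.map_cons, List.nodup_cons] at hnd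
    by_cases h : a.1 = s
    · subst h
      simp only [beq_self_eq_true, if_true, Option.some.injEq, List.mem_cons]
      constructor
      · rintro rfl; left; rfl
      · rintro (h | h)
        · exact congrArg Prod.snd h.symm
        · exact absurd (List.mem_map_of_mem (f := Prod.fst) h) (by simpa using hnd.1)
    · rw [if_neg (by simpa using h), ih hnd.2]
      simp only [List.mem_cons, Prod.ext_iff]
      constructor
      · exact Or.inr
      · rintro (⟨h1, _⟩ | hh)
        · exact absurd h1.symm h
        · exact hh

theorem pv_get?_iff (s : String) (k : Int) :
    PySem.Dict.get? pvKW s = some k ↔ (s, k) ∈ pvKWS :=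
  pv_get?_mk_iff pvKWS (by decide) s k

-- membership in a fold whose step only accumulates
theorem pv_mem_foldl_step {β : Type} (g : PySem.Set Int → β → PySem.Set Int)
    (P : β → Int → Prop)
    (hg : ∀ s b x, x ∈ g s b ↔ x ∈ s ∨ P b x)
    (l : List β) (s : PySem.Set Int) (x : Int) :
    x ∈ l.foldl g s ↔ x ∈ s ∨ ∃ b ∈ l, P b x := by
  induction l generalizing s with
  | nil => simp
  | cons a t ih =>
    simp only [List.foldl_cons, ih, hg, List.mem_cons]
    constructor
    · rintro ((h | h) | ⟨b, hb, hp⟩)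
      · exact Or.inl h
      · exact Or.inr ⟨a, Or.inl rfl, h⟩
      · exact Or.inr ⟨b, Or.inr hb, hp⟩
    · rintro (h | ⟨b, (rfl | hb), hp⟩)
      · exact Or.inl (Or.inl h)
      · exact Or.inl (Or.inr hp)
      · exact Or.inr ⟨b, hb, hp⟩

theorem pv_mem_matchAdd (s : PySem.Set Int) (o : Option Int) (x : Int) :
    x ∈ (match o with | some k => PySem.Set.add s k | none => s) ↔ x ∈ s ∨ o = some x := by
  cases o <;> simp [PySem.Set.mem_add, eq_comm]

-- what ends up in the 'hits' set of B's substring-enumeration phase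
theorem pv_mem_hits (dl : String) (x : Int) :
    x ∈ (PySem.List.pyRange 0 (PySem.Str.len dl)).foldl (fun hits i =>
          (PySem.List.pyRange 3 11).foldl (fun hits len =>
            match PySem.Dict.get? pvKW (PySem.Str.slice dl (some i) (some (i + len))) with
            | some k => PySem.Set.add hits k
            | none => hits) hits) PySem.Set.empty
    ↔ ∃ i, (0 ≤ i ∧ i < PySem.Str.len dl) ∧ ∃ L, (3 ≤ L ∧ L < 11) ∧
        PySem.Dict.get? pvKW (PySem.Str.slice dl (some i) (some (i + L))) = some x := by
  rw [pv_mem_foldl_step _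
      (fun i x => ∃ L ∈ PySem.List.pyRange 3 11,
        PySem.Dict.get? pvKW (PySem.Str.slice dl (some i) (some (i + L))) = some x)
      (fun s i x => pv_mem_foldl_step _
        (fun L x => PySem.Dict.get? pvKW (PySem.Str.slice dl (some i) (some (i + L))) = some x)
        (fun s L x => pv_mem_matchAdd s _ x) _ s x)]
  simp [PySem.Set.empty, PySem.List.mem_pyRange_one]

-- a keyword of length 3..10 occurs as some scanned slice iff it is a substring ('kw in dl')
theorem pv_exists_slice_iff (dl kw : String) (h3 : 3 ≤ kw.toList.length) (h10 : kw.toList.length ≤ 10) :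
    (∃ i, (0 ≤ i ∧ i < PySem.Str.len dl) ∧ ∃ L, (3 ≤ L ∧ L < 11) ∧
        PySem.Str.slice dl (some i) (some (i + L)) = kw)
    ↔ PySem.Str.isIn kw dl = true := by
  rw [show PySem.Str.isIn kw dl = PySem.Chars.isIn kw.toList dl.toList from by
        simp [PySem.Str.isIn_eq],
      ← PySem.Chars.exists_prefix_drop_iff_isIn]
  constructor
  · rintro ⟨i, ⟨hi0, _⟩, L, ⟨hL3, _⟩, hsl⟩
    refine ⟨i.toNat, ?_⟩
    have : kw.toList = List.take ((i + L).toNat - i.toNat) (List.drop i.toNat dl.toList) := by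
      rw [← PySem.List.slice_toNat dl.toList hi0 (by omega), ← PySem.Chars.slice_eq_listSlice,
          ← PySem.Str.toList_slice, hsl]
    rw [this]
    exact List.take_prefix _ _
  · rintro ⟨j, hpre⟩
    have hne : kw.toList ≠ [] := by intro h; rw [h] at h3; simp at h3
    have hj : j < dl.toList.length := by
      by_contra hj
      rw [List.drop_eq_nil_of_le (by omega)] at hpre
      exact hne (List.prefix_nil.mp hpre)
    refine ⟨(j : Int), ⟨by positivity, by rw [PySem.Str.len_eq]; exact_mod_cast hj⟩,
      (kw.toList.length : Int), ⟨by exact_mod_cast h3, by exact_mod_cast (by omega : kw.toList.length < 11)⟩, ?_⟩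
    apply String.toList_inj.mp
    rw [PySem.Str.toList_slice, PySem.Chars.slice_eq_listSlice, PySem.List.slice_natCast_add]
    exact (List.prefix_iff_eq_take.mp hpre).symm

-- industry k is hit iff one of its keywords is a substring of dl
theorem pv_hits_cond (dl : String) (k : Int) (KWs : List String)
    (hk : ∀ s, PySem.Dict.get? pvKW s = some k ↔ s ∈ KWs)
    (hlen : ∀ kw ∈ KWs, 3 ≤ kw.toList.length ∧ kw.toList.length ≤ 10) :
    PySem.Set.contains
      ((PySem.List.pyRange 0 (PySem.Str.len dl)).foldl (fun hits i =>
          (PySem.List.pyRange 3 11).foldl (fun hits len =>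
            match PySem.Dict.get? pvKW (PySem.Str.slice dl (some i) (some (i + len))) with
            | some k => PySem.Set.add hits k
            | none => hits) hits) PySem.Set.empty) k
      = KWs.any (fun t => PySem.Str.isIn t dl) := by
  rw [Bool.eq_iff_iff, PySem.Set.contains_iff, pv_mem_hits, List.any_eq_true]
  constructor
  · rintro ⟨i, hi, L, hL, hg⟩
    have hmem := (hk _).mp hg
    obtain ⟨h3, h10⟩ := hlen _ hmem
    exact ⟨_, hmem, (pv_exists_slice_iff dl _ h3 h10).mp ⟨i, hi, L, hL, rfl⟩⟩
  · rintro ⟨kw, hmem, hin⟩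
    obtain ⟨h3, h10⟩ := hlen _ hmem
    obtain ⟨i, hi, L, hL, hsl⟩ := (pv_exists_slice_iff dl kw h3 h10).mpr hin
    exact ⟨i, hi, L, hL, (hk _).mpr (hsl ▸ hmem)⟩

theorem pv_cond0 (dl : String) : PySem.Set.contains
      ((PySem.List.pyRange 0 (PySem.Str.len dl)).foldl (fun hits i =>
          (PySem.List.pyRange 3 11).foldl (fun hits len =>
            match PySem.Dict.get? pvKW (PySem.Str.slice dl (some i) (some (i + len))) with
            | some k => PySem.Set.add hits k
            | none => hits) hits) PySem.Set.empty) 0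
      = (["tech", "soft", "app", "code", "dev"]).any (fun t => PySem.Str.isIn t dl) :=
  pv_hits_cond dl 0 _ (fun s => by rw [pv_get?_iff]; simp [pvKWS]) (by decide)

theorem pv_cond1 (dl : String) : PySem.Set.contains
      ((PySem.List.pyRange 0 (PySem.Str.len dl)).foldl (fun hits i =>
          (PySem.List.pyRange 3 11).foldl (fun hits len =>
            match PySem.Dict.get? pvKW (PySem.Str.slice dl (some i) (some (i + len))) with
            | some k => PySem.Set.add hits k
            | none => hits) hits) PySem.Set.empty) 1
      = (["bank", "fin", "pay", "money", "credit", "invest"]).any (fun t => PySem.Str.isIn t dl) :=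
  pv_hits_cond dl 1 _ (fun s => by rw [pv_get?_iff]; simp [pvKWS]) (by decide)

theorem pv_cond2 (dl : String) : PySem.Set.contains
      ((PySem.List.pyRange 0 (PySem.Str.len dl)).foldl (fun hits i =>
          (PySem.List.pyRange 3 11).foldl (fun hits len =>
            match PySem.Dict.get? pvKW (PySem.Str.slice dl (some i) (some (i + len))) with
            | some k => PySem.Set.add hits k
            | none => hits) hits) PySem.Set.empty) 2
      = (["shop", "store", "retail", "ecom", "cart"]).any (fun t => PySem.Str.isIn t dl) :=
  pv_hits_cond dl 2 _ (fun s => by rw [pv_get?_iff]; simp [pvKWS]) (by decide)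

theorem pv_cond3 (dl : String) : PySem.Set.contains
      ((PySem.List.pyRange 0 (PySem.Str.len dl)).foldl (fun hits i =>
          (PySem.List.pyRange 3 11).foldl (fun hits len =>
            match PySem.Dict.get? pvKW (PySem.Str.slice dl (some i) (some (i + len))) with
            | some k => PySem.Set.add hits k
            | none => hits) hits) PySem.Set.empty) 3
      = (["health", "med", "care", "hospital", "clinic"]).any (fun t => PySem.Str.isIn t dl) :=
  pv_hits_cond dl 3 _ (fun s => by rw [pv_get?_iff]; simp [pvKWS]) (by decide)

theorem pv_cond4 (dl : String) : PySem.Set.contains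
      ((PySem.List.pyRange 0 (PySem.Str.len dl)).foldl (fun hits i =>
          (PySem.List.pyRange 3 11).foldl (fun hits len =>
            match PySem.Dict.get? pvKW (PySem.Str.slice dl (some i) (some (i + len))) with
            | some k => PySem.Set.add hits k
            | none => hits) hits) PySem.Set.empty) 4
      = (["edu", "school", "university", "college", "learn"]).any (fun t => PySem.Str.isIn t dl) :=
  pv_hits_cond dl 4 _ (fun s => by rw [pv_get?_iff]; simp [pvKWS]) (by decide)

-- ===== VERDICT =====
theorem industry_specific_generation_py_spec : Claim_equal_industry_specific_generation_py := by
  intro domain _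
  unfold Spec_industry_specific_generation_py
  unfold industry_specific_generation_py industry_specific_generation_py_alt
  simp only [pvSUBS, PySem.List.enumerate_cons, PySem.List.enumerate_nil,
    List.foldl_cons, List.foldl_nil, Int.reduceAdd, pv_cond0, pv_cond1, pv_cond2, pv_cond3, pv_cond4]
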